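-- pv_equiv track=rewrite | github.com/whitelam-dev/debateauditor | bot.py | chunk_text
-- ===== SOURCE A (Python) =====
-- def chunk_text(text, limit=2000):
--     if len(text) <= limit:
--         return [text]
--     chunks = []
--     while len(text) > limit:
--         split_pos = text.rfind("\n", 0, limit)
--         if split_pos == -1:
--             split_pos = limit
--         chunks.append(text[:split_pos])
--         text = text[split_pos:]
--         if text.startswith("\n"):
--             text = text[1:]
--     if text:
--         chunks.append(text)
--     return chunks
-- ===== SOURCE B (Python) =====
-- def chunk_text(text, limit=2000):
--     n = len(text)
--     if n <= limit:
--         return [text]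
--     chunks = []
--     start = 0
--     while n - start > limit:
--         pos = text.rfind("\n", start, start + limit)
--         if pos == -1:
--             cut = start + limit
--             chunks.append(text[start:cut])
--             start = cut + (text[cut] == "\n")
--         else:
--             chunks.append(text[start:pos])
--             start = pos + 1
--     if start < n:
--         chunks.append(text[start:])
--     return chunks
-- ===== Notes on version B (the rewrite author's own statement) =====
-- stated objective: alternative
-- what changed: B keeps a running integer start offset and rfinds inside the window [start, start+limit), slicing each chunk out of the original string once, instead of A's repeated reslicing of the whole remaining tail on every iteration.
-- outside the precondition, e.g. on chunk_text('\n\n', 0): A returns ['', ''], B returns ['', '']; on chunk_text('', 0): A returns [''], B returns ['']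
import Mathlib
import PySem

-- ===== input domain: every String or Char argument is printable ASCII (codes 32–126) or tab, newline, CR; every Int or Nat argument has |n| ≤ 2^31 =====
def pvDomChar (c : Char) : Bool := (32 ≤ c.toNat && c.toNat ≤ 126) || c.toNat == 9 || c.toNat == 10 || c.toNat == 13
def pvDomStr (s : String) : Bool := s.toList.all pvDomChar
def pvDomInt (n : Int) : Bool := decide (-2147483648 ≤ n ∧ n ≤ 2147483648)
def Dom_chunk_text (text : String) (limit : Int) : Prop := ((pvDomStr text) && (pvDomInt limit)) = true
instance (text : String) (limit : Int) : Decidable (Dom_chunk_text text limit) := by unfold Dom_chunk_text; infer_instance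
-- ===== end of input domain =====

-- B chunks with a running start offset and one slice per chunk instead of A's repeated
-- reslicing of the whole remaining tail on every iteration (objective: alternative).
-- ===== PORT A =====
-- A's while-loop, fueled: under Pre_ (1 ≤ limit) every iteration removes at least one
-- character, so fuel = |text| is never exhausted there.
def chunkTextLoopA (limit : Int) : Nat → List Char → List String → List String
  | 0, _, chunks => chunks
  | fuel + 1, t, chunks =>
    if (t.length : Int) > limit then
      let sp0 := PySem.Chars.rfindFrom t ['\n'] 0 (some limit)
      let split_pos := if sp0 = -1 then limit else sp0
      let chunks := chunks ++ [String.ofList (PySem.Chars.slice t none (some split_pos))]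
      let t1 := PySem.Chars.slice t (some split_pos) none
      let t2 := if PySem.Chars.startswith t1 ['\n'] then PySem.Chars.slice t1 (some 1) none else t1
      chunkTextLoopA limit fuel t2 chunks
    else if t ≠ [] then chunks ++ [String.ofList t] else chunks


def chunk_text (text : String) (limit : Int) : List String :=
  if PySem.Str.len text ≤ limit then [text]
  else chunkTextLoopA limit text.toList.length text.toList []

-- ===== PORT B =====
-- B's while-loop, fueled the same way: start grows by at least one per iteration under Pre_.
def chunkTextLoopB (text : List Char) (n limit : Int) : Nat → Int → List String → List String
  | 0, _, chunks => chunks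
  | fuel + 1, start, chunks =>
    if n - start > limit then
      let pos := PySem.Chars.rfindFrom text ['\n'] start (some (start + limit))
      if pos = -1 then
        let cut := start + limit
        let chunks := chunks ++ [String.ofList (PySem.Chars.slice text (some start) (some cut))]
        chunkTextLoopB text n limit fuel
          (cut + (if PySem.List.pyGet? text cut = some '\n' then 1 else 0)) chunks
      else
        let chunks := chunks ++ [String.ofList (PySem.Chars.slice text (some start) (some pos))]
        chunkTextLoopB text n limit fuel (pos + 1) chunks
    else if start < n then chunks ++ [String.ofList (PySem.Chars.slice text (some start) none)]
    else chunks


def chunk_text_alt (text : String) (limit : Int) : List String :=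
  let n := PySem.Str.len text
  if n ≤ limit then [text]
  else chunkTextLoopB text.toList n limit text.toList.length 0 []

-- ===== PRECONDITION & SPEC =====
-- Pre_ excludes limit ≤ 0: there Python's A loops forever on every text longer than limit that
-- contains a non-newline character; on the degenerate all-newline/empty texts where A does
-- return with limit = 0, B returns the same value anyway.
def Pre_chunk_text (text : String) (limit : Int) : Prop := 1 ≤ limit
instance (text : String) (limit : Int) : Decidable (Pre_chunk_text text limit) := by
  unfold Pre_chunk_text; infer_instance
def pvWitness_chunk_text : String × Int := ("a\nb", 2)
def Spec_chunk_text (text : String) (limit : Int) (out : List String) : Prop := out = chunk_text_alt text limit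
instance (text : String) (limit : Int) (out : List String) : Decidable (Spec_chunk_text text limit out) := by unfold Spec_chunk_text; infer_instance

-- ===== CLAIM (what is proved, stated in full; the proofs are below) =====
def Claim_equal_chunk_text : Prop := ∀ (text : String) (limit : Int), Dom_chunk_text text limit → Pre_chunk_text text limit → Spec_chunk_text text limit (chunk_text text limit)

-- ===== LEMMAS AND PROOFS =====

lemma isPrefixOf_singleton_iff (c : Char) (xs : List Char) :
    [c].isPrefixOf xs = true ↔ xs.head? = some c := by
  rw [List.isPrefixOf_iff_prefix]
  cases xs <;> simp [List.cons_prefix_iff, eq_comm]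

lemma rfind_go_cases (s sub : List Char) (k : Nat) :
    PySem.Chars.rfind.go s sub k = -1 ∨
      (0 ≤ PySem.Chars.rfind.go s sub k ∧ (PySem.Chars.rfind.go s sub k).toNat ≤ k ∧
        sub <+: s.drop (PySem.Chars.rfind.go s sub k).toNat) := by
  induction k with
  | zero =>
    by_cases h : sub.isPrefixOf s = true
    · right
      simp [PySem.Chars.rfind.go, h, List.isPrefixOf_iff_prefix.mp h]
    · left; simp [PySem.Chars.rfind.go, h]
  | succ j ih =>
    by_cases h : sub.isPrefixOf (List.drop (j + 1) s) = true
    · right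
      simp only [PySem.Chars.rfind.go, h, if_true]
      refine ⟨by positivity, by simp, ?_⟩
      simpa using List.isPrefixOf_iff_prefix.mp h
    · simpa only [PySem.Chars.rfind.go, h, if_false] using
        ih.imp id (fun ⟨h1, h2, h3⟩ => ⟨h1, Nat.le_succ_of_le h2, h3⟩)

lemma rfind_cases (w sub : List Char) (hsub : sub ≠ []) :
    PySem.Chars.rfind w sub = -1 ∨
      (0 ≤ PySem.Chars.rfind w sub ∧ (PySem.Chars.rfind w sub).toNat < w.length ∧
        sub <+: w.drop (PySem.Chars.rfind w sub).toNat) := by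
  simp only [PySem.Chars.rfind]
  rcases rfind_go_cases w sub w.length with h | ⟨h1, h2, h3⟩
  · exact Or.inl h
  · right
    refine ⟨h1, lt_of_le_of_ne h2 ?_, h3⟩
    intro he
    rw [he, List.drop_length] at h3
    exact hsub (List.prefix_nil.mp h3)

lemma rfindFrom_zero_window (rem sub : List Char) (limit : Int) (h1 : 1 ≤ limit)
    (h2 : limit < (rem.length : Int)) :
    PySem.Chars.rfindFrom rem sub 0 (some limit) =
      (if PySem.Chars.rfind (rem.take limit.toNat) sub = -1 then -1
       else PySem.Chars.rfind (rem.take limit.toNat) sub) := by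
  have e1 : ¬ ((rem.length : Int) < limit) := by omega
  have e2 : ¬ (limit < 0) := by omega
  have e3 : ¬ ((0:Int) < 0) := by omega
  simp only [PySem.Chars.rfindFrom, if_neg e1, if_neg e2, if_neg e3]
  simp

lemma rfindFrom_window (L sub : List Char) (s : Nat) (limit : Int) (h1 : 1 ≤ limit)
    (h2 : (s : Int) + limit < (L.length : Int)) :
    PySem.Chars.rfindFrom L sub (s : Int) (some ((s : Int) + limit)) =
      (if PySem.Chars.rfind ((L.drop s).take limit.toNat) sub = -1 then -1
       else (s : Int) + PySem.Chars.rfind ((L.drop s).take limit.toNat) sub) := by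
  have e1 : ¬ ((L.length : Int) < (s : Int) + limit) := by omega
  have e2 : ¬ ((s : Int) + limit < 0) := by omega
  have e3 : ¬ ((s : Int) < 0) := by omega
  have e4 : ¬ ((s : Int) + limit < (s : Int)) := by omega
  simp only [PySem.Chars.rfindFrom, if_neg e1, if_neg e2, if_neg e3, if_neg e4]
  have hd : List.drop ((s : Int)).toNat (List.take ((s : Int) + limit).toNat L)
      = (L.drop s).take limit.toNat := by
    rw [Int.toNat_natCast, List.drop_take]
    all_goals (congr 1 <;> omega)
  rw [hd]
lemma loop_eq (L : List Char) (limit : Int) (hl : 1 ≤ limit) :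
    ∀ (fuel : Nat) (s : Nat) (chunks : List String), s ≤ L.length → L.length - s ≤ fuel →
      chunkTextLoopA limit fuel (L.drop s) chunks
        = chunkTextLoopB L (L.length : Int) limit fuel (s : Int) chunks := by
  intro fuel
  induction fuel with
  | zero => intro s chunks _ _; rfl
  | succ fuel ih =>
    intro s chunks hs hfuel
    have hlen : ((L.drop s).length : Int) = (L.length : Int) - s := by
      simp only [List.length_drop]; omega
    by_cases hgt : (L.length : Int) - (s : Int) > limit
    · have hA : ((L.drop s).length : Int) > limit := by omega
      simp only [chunkTextLoopA, chunkTextLoopB]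
      rw [if_pos hA, if_pos hgt]
      rw [rfindFrom_zero_window _ _ _ hl hA, rfindFrom_window L _ s limit hl (by omega)]
      have hwlen : ((L.drop s).take limit.toNat).length = limit.toNat := by
        simp only [List.length_take]; omega
      rcases rfind_cases ((L.drop s).take limit.toNat) ['\n'] (by simp) with hr | ⟨hr0, hrlt, hrpre⟩
      · -- no newline found in the window
        rw [hr]
        simp only [reduceIte]
        -- chunks appended are equal
        have hcA : PySem.Chars.slice (L.drop s) none (some limit) = (L.drop s).take limit.toNat := by
          rw [PySem.Chars.slice_eq_listSlice, PySem.List.slice_to _ (show (0:Int) ≤ limit by omega)]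
        have hcB : PySem.Chars.slice L (some (s : Int)) (some ((s : Int) + limit))
            = (L.drop s).take limit.toNat := by
          rw [PySem.Chars.slice_eq_listSlice,
            PySem.List.slice_of_nonneg L (a := (s : Int)) (b := (s : Int) + limit)
              (by omega) (by omega) (by omega) (by omega)]
          all_goals (congr 1 <;> omega)
        rw [hcA, hcB]
        -- the new tail of A
        have ht1 : PySem.Chars.slice (L.drop s) (some limit) none = L.drop (s + limit.toNat) := by
          rw [PySem.Chars.slice_eq_listSlice, PySem.List.slice_from _ (show (0:Int) ≤ limit by omega), List.drop_drop]
        rw [ht1]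
        have hget : PySem.List.pyGet? L ((s : Int) + limit) = L[s + limit.toNat]? := by
          have : (s : Int) + limit = ((s + limit.toNat : Nat) : Int) := by omega
          rw [this, PySem.List.pyGet?_natCast]
        rw [hget]
        have hsw : PySem.Chars.startswith (L.drop (s + limit.toNat)) ['\n']
            = (L[s + limit.toNat]? == some '\n') := by
          simp only [PySem.Chars.startswith]
          rcases h : L[s + limit.toNat]? with _ | c
          · rw [show ['\n'].isPrefixOf (L.drop (s + limit.toNat)) = false from ?_]
            · simp
            · rw [Bool.eq_false_iff]
              intro hp
              rw [isPrefixOf_singleton_iff, List.head?_drop, h] at hp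
              cases hp
          · by_cases hc : c = '\n'
            · subst hc
              rw [show ['\n'].isPrefixOf (L.drop (s + limit.toNat)) = true from ?_]
              · simp
              · rw [isPrefixOf_singleton_iff, List.head?_drop]; exact h
            · rw [show ['\n'].isPrefixOf (L.drop (s + limit.toNat)) = false from ?_]
              · simp [hc]
              · rw [Bool.eq_false_iff]
                intro hp
                rw [isPrefixOf_singleton_iff, List.head?_drop, h] at hp
                exact hc (by injection hp)
        rw [hsw]
        by_cases hnl : L[s + limit.toNat]? = some '\n'
        · rw [if_pos (by simp [hnl]), if_pos (by simp [hnl])]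
          have htail : PySem.Chars.slice (L.drop (s + limit.toNat)) (some 1) none
              = L.drop (s + limit.toNat + 1) := by
            rw [PySem.Chars.slice_eq_listSlice, PySem.List.slice_from_one, List.tail_drop]
          rw [htail]
          have hcast : (s : Int) + limit + 1 = ((s + limit.toNat + 1 : Nat) : Int) := by
            push_cast; omega
          rw [hcast]
          exact ih (s + limit.toNat + 1) _ (by omega) (by omega)
        · rw [if_neg (by simp [hnl]), if_neg (by simp [hnl])]
          have hcast : (s : Int) + limit + 0 = ((s + limit.toNat : Nat) : Int) := by
            push_cast; omega
          rw [hcast]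
          exact ih (s + limit.toNat) _ (by omega) (by omega)
      · -- newline found at relative index r
        set r := PySem.Chars.rfind ((L.drop s).take limit.toNat) ['\n'] with hrdef
        have hrne : ¬ (r = -1) := by omega
        have hsrne : ¬ ((s : Int) + r = -1) := by omega
        simp only [if_neg hrne, if_neg hsrne]
        have hrlim : r.toNat < limit.toNat := by omega
        have hcA : PySem.Chars.slice (L.drop s) none (some r) = (L.drop s).take r.toNat := by
          rw [PySem.Chars.slice_eq_listSlice, PySem.List.slice_to _ hr0]
        have hcB : PySem.Chars.slice L (some (s : Int)) (some ((s : Int) + r))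
            = (L.drop s).take r.toNat := by
          rw [PySem.Chars.slice_eq_listSlice,
            PySem.List.slice_of_nonneg L (a := (s : Int)) (b := (s : Int) + r)
              (by omega) (by omega) (by omega) (by omega)]
          all_goals (congr 1 <;> omega)
        rw [hcA, hcB]
        have ht1 : PySem.Chars.slice (L.drop s) (some r) none = L.drop (s + r.toNat) := by
          rw [PySem.Chars.slice_eq_listSlice, PySem.List.slice_from _ hr0, List.drop_drop]
        rw [ht1]
        have hpre2 : ['\n'] <+: L.drop (s + r.toNat) := by
          have h1 : ((L.drop s).take limit.toNat).drop r.toNat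
              = (L.drop (s + r.toNat)).take (limit.toNat - r.toNat) := by
            rw [List.drop_take, List.drop_drop]
          have h2 : (L.drop (s + r.toNat)).take (limit.toNat - r.toNat) <+: L.drop (s + r.toNat) :=
            List.take_prefix _ _
          rw [h1] at hrpre
          exact hrpre.trans h2
        have hsw : PySem.Chars.startswith (L.drop (s + r.toNat)) ['\n'] = true := by
          simp only [PySem.Chars.startswith]
          exact List.isPrefixOf_iff_prefix.mpr hpre2
        rw [if_pos hsw]
        have htail : PySem.Chars.slice (L.drop (s + r.toNat)) (some 1) none
            = L.drop (s + r.toNat + 1) := by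
          rw [PySem.Chars.slice_eq_listSlice, PySem.List.slice_from_one, List.tail_drop]
        rw [htail]
        have hcast : (s : Int) + r + 1 = ((s + r.toNat + 1 : Nat) : Int) := by
          push_cast; omega
        rw [hcast]
        exact ih (s + r.toNat + 1) _ (by omega) (by omega)
    · have hA : ¬ (((L.drop s).length : Int) > limit) := by omega
      simp only [chunkTextLoopA, chunkTextLoopB]
      rw [if_neg hA, if_neg hgt]
      by_cases hne : s < L.length
      · rw [if_pos (show L.drop s ≠ [] by simp [List.drop_eq_nil_iff]; omega),
          if_pos (show (s : Int) < (L.length : Int) by exact_mod_cast hne)]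
        have : PySem.Chars.slice L (some (s : Int)) none = L.drop s := by
          rw [PySem.Chars.slice_eq_listSlice, PySem.List.slice_from _ (show (0:Int) ≤ (s:Int) by omega)]
          simp
        rw [this]
      · rw [if_neg (show ¬ (L.drop s ≠ []) by simp [List.drop_eq_nil_iff]; omega),
          if_neg (show ¬ ((s : Int) < (L.length : Int)) by exact_mod_cast hne)]

-- ===== VERDICT (by name: the statement is the Claim_ definition above) =====
theorem chunk_text_spec : Claim_equal_chunk_text := by
  intro text limit _ hpre
  unfold Spec_chunk_text chunk_text chunk_text_alt
  simp only [PySem.Str.len]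
  by_cases hle : ((text.toList.length : Int)) ≤ limit
  · rw [if_pos hle, if_pos hle]
  · rw [if_neg hle, if_neg hle]
    have h := loop_eq text.toList limit hpre text.toList.length 0 [] (by omega) (by omega)
    simpa using h
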